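-- pv_equiv track=rewrite | github.com/andreasronge/folding-evolution | experiments/exp_chemistry_aware_dup.py | _find_bonded_runs
-- ===== SOURCE A (Python) =====
-- def _find_bonded_runs(bonded: set[int], genotype_len: int) -> list[tuple[int, int]]:
--     """Find contiguous runs of bonded indices.
--
--     Returns list of (start, end) tuples where genotype[start:end]
--     is a contiguous sequence of bonded characters. Minimum run length 2.
--     """
--     if not bonded:
--         return []
--     sorted_b = sorted(bonded)
--     runs = []
--     run_start = sorted_b[0]
--     prev = sorted_b[0]
--     for idx in sorted_b[1:]:
--         if idx == prev + 1:
--             prev = idx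
--         else:
--             if prev - run_start >= 1:  # at least 2 chars
--                 runs.append((run_start, prev + 1))
--             run_start = idx
--             prev = idx
--     if prev - run_start >= 1:
--         runs.append((run_start, prev + 1))
--     return runs
-- ===== SOURCE B (Python) =====
-- def _find_bonded_runs(bonded: set[int], genotype_len: int) -> list[tuple[int, int]]:
--     """Start-detection re-implementation: x starts a run iff x-1 is not bonded;
--     extend each run upward by membership tests, then sort the few runs by start."""
--     runs = []
--     for x in bonded:
--         if x - 1 not in bonded:
--             end = x + 1
--             while end in bonded:
--                 end += 1
--             if end - x >= 2:
--                 runs.append((x, end))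
--     runs.sort(key=lambda r: r[0])
--     return runs
-- ===== Notes on version B (the rewrite author's own statement) =====
-- stated objective: alternative
-- what changed: Replaces the sort-then-stateful-scan (run_start/prev accumulator over sorted(bonded)) by run-start detection: x starts a run iff x-1 is not bonded, each run is extended upward by membership tests, and only the collected runs (at most n/2 of them) are sorted at the end.
import Mathlib
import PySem

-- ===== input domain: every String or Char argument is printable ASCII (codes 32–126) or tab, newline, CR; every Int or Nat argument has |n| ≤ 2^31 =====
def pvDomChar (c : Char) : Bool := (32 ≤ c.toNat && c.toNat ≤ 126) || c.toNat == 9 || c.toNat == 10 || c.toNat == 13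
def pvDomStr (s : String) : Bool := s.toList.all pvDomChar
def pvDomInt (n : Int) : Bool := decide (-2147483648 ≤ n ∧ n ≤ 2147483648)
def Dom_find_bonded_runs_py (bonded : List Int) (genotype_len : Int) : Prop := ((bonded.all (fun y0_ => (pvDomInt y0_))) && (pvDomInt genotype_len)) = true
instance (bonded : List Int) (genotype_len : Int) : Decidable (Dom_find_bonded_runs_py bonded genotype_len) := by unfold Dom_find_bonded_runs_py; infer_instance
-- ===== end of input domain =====

-- B replaces A's sort-then-stateful-scan by run-start detection (x starts a run iff
-- x-1 is not bonded) with upward extension by membership tests, sorting only the runs.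

-- ===== PORT A =====
def find_bonded_runs_py (bonded : List Int) (genotype_len : Int) : List (Int × Int) :=
  if bonded = [] then []
  else
    match PySem.List.sorted bonded (fun x => x) false with
    | [] => []   -- unreachable: sorted of a nonempty list is nonempty
    | h :: t =>
      let st := t.foldl (fun (s : List (Int × Int) × Int × Int) idx =>
        if idx = s.2.2 + 1 then (s.1, s.2.1, idx)
        else if s.2.2 - s.2.1 ≥ 1 then (s.1 ++ [(s.2.1, s.2.2 + 1)], idx, idx)
        else (s.1, idx, idx)) ([], h, h)
      if st.2.2 - st.2.1 ≥ 1 then st.1 ++ [(st.2.1, st.2.2 + 1)] else st.1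

-- ===== PORT B =====
-- the 'while end in bonded: end += 1' loop; fuel bonded.length suffices (pvExtend_val below)
def pvExtendRun (bonded : List Int) : Nat → Int → Int
  | 0, e => e
  | fuel+1, e => if PySem.Set.contains bonded e then pvExtendRun bonded fuel (e+1) else e

def find_bonded_runs_py_alt (bonded : List Int) (genotype_len : Int) : List (Int × Int) :=
  let runs := bonded.foldl (fun acc x =>
    if PySem.Set.contains bonded (x - 1) then acc
    else
      let e := pvExtendRun bonded bonded.length (x + 1)
      if e - x ≥ 2 then acc ++ [(x, e)] else acc) []
  PySem.List.sorted runs (fun r => r.1) false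

-- ===== PRECONDITION & SPEC =====
-- bonded is a Python set; under the type convention its List Int encoding holds DISTINCT
-- elements, so Pre_ requires exactly that (the encoding never carries duplicates).
def Pre_find_bonded_runs_py (bonded : List Int) (genotype_len : Int) : Prop := bonded.Nodup
instance (bonded : List Int) (genotype_len : Int) : Decidable (Pre_find_bonded_runs_py bonded genotype_len) := by unfold Pre_find_bonded_runs_py; infer_instance
def pvWitness_find_bonded_runs_py : List Int × Int := ([5, 0, 1, 2, 6], 10)

def Spec_find_bonded_runs_py (bonded : List Int) (genotype_len : Int) (out : List (Int × Int)) : Prop := out = find_bonded_runs_py_alt bonded genotype_len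
instance (bonded : List Int) (genotype_len : Int) (out : List (Int × Int)) : Decidable (Spec_find_bonded_runs_py bonded genotype_len out) := by unfold Spec_find_bonded_runs_py; infer_instance

-- ===== CLAIM (what is proved, stated in full; the proofs are below) =====
def Claim_equal_find_bonded_runs_py : Prop := ∀ (bonded : List Int) (genotype_len : Int), Dom_find_bonded_runs_py bonded genotype_len → Pre_find_bonded_runs_py bonded genotype_len → Spec_find_bonded_runs_py bonded genotype_len (find_bonded_runs_py bonded genotype_len)

-- ===== LEMMAS AND PROOFS =====

-- the per-element effect of B's loop body
def pvF (bonded : List Int) (x : Int) : Option (Int × Int) :=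
  if PySem.Set.contains bonded (x - 1) then none
  else
    let e := pvExtendRun bonded bonded.length (x + 1)
    if e - x ≥ 2 then some (x, e) else none

-- A's scan, as structural recursion (final emission folded in)
def pvScanA (rs prev : Int) : List Int → List (Int × Int)
  | [] => if prev - rs ≥ 1 then [(rs, prev + 1)] else []
  | idx :: t =>
    if idx = prev + 1 then pvScanA rs idx t
    else (if prev - rs ≥ 1 then [(rs, prev + 1)] else []) ++ pvScanA idx idx t

lemma pvFoldlA_eq_scanA (t : List Int) : ∀ (acc : List (Int × Int)) (rs prev : Int),
    (let st := t.foldl (fun (s : List (Int × Int) × Int × Int) idx =>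
        if idx = s.2.2 + 1 then (s.1, s.2.1, idx)
        else if s.2.2 - s.2.1 ≥ 1 then (s.1 ++ [(s.2.1, s.2.2 + 1)], idx, idx)
        else (s.1, idx, idx)) (acc, rs, prev);
      if st.2.2 - st.2.1 ≥ 1 then st.1 ++ [(st.2.1, st.2.2 + 1)] else st.1)
      = acc ++ pvScanA rs prev t := by
  induction t with
  | nil => intro acc rs prev; by_cases h : prev - rs ≥ 1 <;> simp [pvScanA, h]
  | cons idx t ih =>
    intro acc rs prev
    simp only [List.foldl_cons, pvScanA]
    by_cases h1 : idx = prev + 1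
    · simp [h1, ih]
    · by_cases h2 : prev - rs ≥ 1 <;>
        simp [h1, h2, ih, List.append_assoc]

lemma pvFoldl_toList {α β : Type} (g : α → Option β) (l : List α) : ∀ (acc : List β),
    l.foldl (fun acc x => acc ++ (g x).toList) acc = acc ++ l.filterMap g := by
  induction l with
  | nil => intro acc; simp
  | cons x l ih =>
    intro acc
    cases hg : g x <;> simp [hg, ih, List.filterMap_cons]

lemma pvFoldlB_eq_filterMap (bonded : List Int) (l : List Int) (acc : List (Int × Int)) :
    l.foldl (fun acc x =>
      if PySem.Set.contains bonded (x - 1) then acc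
      else
        let e := pvExtendRun bonded bonded.length (x + 1)
        if e - x ≥ 2 then acc ++ [(x, e)] else acc) acc
    = acc ++ l.filterMap (pvF bonded) := by
  rw [List.foldl_ext _ (fun acc x => acc ++ ((pvF bonded x).toList)) acc
    (by intro a x _
        simp only [pvF]
        by_cases h1 : PySem.Set.contains bonded (x - 1) = true
        · rw [if_pos h1, if_pos h1]; simp
        · rw [if_neg h1, if_neg h1]
          by_cases h2 : pvExtendRun bonded bonded.length (x + 1) - x ≥ 2 <;>
            simp [h2])]
  exact pvFoldl_toList _ l acc

-- a run of bonded.length+1 consecutive integers cannot lie inside bonded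
lemma pvPigeon (bonded : List Int) (a : Int) :
    ∃ j : Nat, j ≤ bonded.length ∧ (a + (j : Int)) ∉ bonded := by
  by_contra h
  push_neg at h
  have hsub : (Finset.range (bonded.length + 1)).image (fun j : Nat => a + (j : Int)) ⊆ bonded.toFinset := by
    intro z hz
    simp only [Finset.mem_image, Finset.mem_range] at hz
    obtain ⟨j, hj, rfl⟩ := hz
    simpa using h j (by omega)
  have hcard := Finset.card_le_card hsub
  have hinj : Function.Injective (fun j : Nat => a + (j : Int)) := by
    intro i j hij; simpa using hij
  rw [Finset.card_image_of_injective _ hinj, Finset.card_range] at hcard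
  have := bonded.toFinset_card_le
  omega

-- value of the fuelled extension loop, given a pinned stopping offset
lemma pvExtend_eq (bonded : List Int) : ∀ (fuel : Nat) (e : Int) (k : Nat), k ≤ fuel →
    (e + (k : Int)) ∉ bonded → (∀ j : Nat, j < k → (e + (j : Int)) ∈ bonded) →
    pvExtendRun bonded fuel e = e + k := by
  intro fuel
  induction fuel with
  | zero =>
    intro e k hk _ _
    interval_cases k
    simp [pvExtendRun]
  | succ fuel ih =>
    intro e k hk hstop hrun
    by_cases hm : e ∈ bonded
    · have hk0 : k ≠ 0 := by rintro rfl; exact absurd hm (by simpa using hstop)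
      have hstep : pvExtendRun bonded (fuel + 1) e = pvExtendRun bonded fuel (e + 1) := by
        simp [pvExtendRun, PySem.Set.contains, hm]
      rw [hstep, ih (e + 1) (k - 1) (by omega)
        (by have h0 : e + 1 + ((k - 1 : Nat) : Int) = e + (k : Int) := by push_cast; omega
            rw [h0]; exact hstop)
        (by intro j hj
            have h1 : e + 1 + (j : Int) = e + ((j + 1 : Nat) : Int) := by push_cast; ring
            rw [h1]; exact hrun _ (by omega))]
      push_cast; omega
    · have hk0 : k = 0 := by
        by_contra h0
        exact hm (by simpa using hrun 0 (by omega))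
      simp [pvExtendRun, PySem.Set.contains, hm, hk0]

-- with fuel bonded.length the loop reaches the least non-member at or above e
lemma pvExtend_val (bonded : List Int) (e : Int) :
    ∃ k : Nat, pvExtendRun bonded bonded.length e = e + k ∧
      (e + (k : Int)) ∉ bonded ∧ (∀ j : Nat, j < k → (e + (j : Int)) ∈ bonded) := by
  obtain ⟨w, hw, hwn⟩ := pvPigeon bonded e
  have hex : ∃ j : Nat, (e + (j : Int)) ∉ bonded := ⟨w, hwn⟩
  refine ⟨Nat.find hex, ?_, Nat.find_spec hex, ?_⟩
  · exact pvExtend_eq bonded bonded.length e _ (le_trans (Nat.find_le hwn) hw)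
      (Nat.find_spec hex) (fun j hj => by simpa using Nat.find_min hex hj)
  · intro j hj; simpa using Nat.find_min hex hj

-- main correspondence: A's scan over the strictly sorted tail = filterMap of B's body
lemma pvScanA_eq_filterMap (bonded : List Int) : ∀ (t : List Int) (rs prev : Int),
    List.Pairwise (· < ·) (prev :: t) → prev ∈ bonded → rs ≤ prev →
    (∀ z ∈ t, z ∈ bonded) →
    (∀ z : Int, z ∈ bonded → z ≤ prev ∨ z ∈ t) →
    pvScanA rs prev t =
      (if pvExtendRun bonded bonded.length (prev + 1) - rs ≥ 2
        then [(rs, pvExtendRun bonded bonded.length (prev + 1))] else [])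
      ++ t.filterMap (pvF bonded) := by
  intro t
  induction t with
  | nil =>
    intro rs prev _ hprev hle _ hcover
    have hstop : (prev + 1 + ((0 : Nat) : Int)) ∉ bonded := by
      intro hmem
      rcases hcover _ (by simpa using hmem) with h | h
      · omega
      · simp at h
    have hext : pvExtendRun bonded bonded.length (prev + 1) = prev + 1 := by
      simpa using pvExtend_eq bonded bonded.length (prev + 1) 0 (by omega) hstop (by omega)
    simp only [pvScanA, hext, List.filterMap_nil, List.append_nil]
    by_cases h : prev - rs ≥ 1
    · rw [if_pos h, if_pos (by omega)]
    · rw [if_neg h, if_neg (by omega)]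
  | cons idx t ih =>
    intro rs prev hpw hprev hle hmem hcover
    have hlt : prev < idx := (List.pairwise_cons.mp hpw).1 idx (by simp)
    have hpw' : List.Pairwise (· < ·) (idx :: t) := (List.pairwise_cons.mp hpw).2
    have hidxlt : ∀ z ∈ t, idx < z := (List.pairwise_cons.mp hpw').1
    have hidx : idx ∈ bonded := hmem idx (by simp)
    by_cases h1 : idx = prev + 1
    · -- run continues
      subst h1
      have hcontains : PySem.Set.contains bonded (prev + 1 - 1) = true := by
        simp only [PySem.Set.contains, List.contains_iff_mem]
        simpa using hprev
      obtain ⟨k1, he1, hs1, hr1⟩ := pvExtend_val bonded (prev + 1)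
      obtain ⟨k2, he2, hs2, hr2⟩ := pvExtend_val bonded (prev + 2)
      have hk10 : k1 ≠ 0 := by
        rintro rfl; exact hs1 (by simpa using hidx)
      have hk12 : k1 = k2 + 1 := by
        rcases lt_trichotomy k1 (k2 + 1) with h | h | h
        · exfalso
          have hmm := hr2 (k1 - 1) (by omega)
          apply hs1
          have heq : prev + 2 + ((k1 - 1 : Nat) : Int) = prev + 1 + (k1 : Int) := by
            have : ((k1 - 1 : Nat) : Int) = (k1 : Int) - 1 := by omega
            rw [this]; ring
          rw [heq] at hmm; exact hmm
        · exact h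
        · exfalso
          have h2 := hr1 (k2 + 1) (by omega)
          apply hs2
          have heq : prev + 1 + ((k2 + 1 : Nat) : Int) = prev + 2 + (k2 : Int) := by
            push_cast; ring
          rw [heq] at h2; exact h2
      have hext : pvExtendRun bonded bonded.length (prev + 1)
          = pvExtendRun bonded bonded.length (prev + 2) := by
        rw [he1, he2, hk12]; push_cast; ring
      have hrec := ih rs (prev + 1) hpw' hidx (by omega)
        (fun z hz => hmem z (by simp [hz]))
        (by intro z hz
            rcases hcover z hz with h | h
            · left; omega
            · rcases List.mem_cons.mp h with h | h
              · left; omega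
              · right; exact h)
      rw [show prev + 1 + 1 = prev + 2 by ring] at hrec
      simp only [pvScanA, if_pos rfl, List.filterMap_cons, pvF, hcontains, if_pos,
        hext, hrec]
    · -- gap: a run (possibly) closes, a new one opens at idx
      have hgap : prev + 2 ≤ idx := by omega
      have hnp1 : (prev + 1) ∉ bonded := by
        intro hmemp
        rcases hcover _ hmemp with h | h
        · omega
        · rcases List.mem_cons.mp h with h | h
          · omega
          · have := hidxlt _ h; omega
      have hext1 : pvExtendRun bonded bonded.length (prev + 1) = prev + 1 := by
        simpa using pvExtend_eq bonded bonded.length (prev + 1) 0 (by omega)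
          (by simpa using hnp1) (by omega)
      have hnidx1 : (idx - 1) ∉ bonded := by
        intro hmemp
        rcases hcover _ hmemp with h | h
        · omega
        · rcases List.mem_cons.mp h with h | h
          · omega
          · have := hidxlt _ h; omega
      have hcontains : PySem.Set.contains bonded (idx - 1) = false := by
        simp only [PySem.Set.contains, List.contains_iff_mem]
        simpa using hnidx1
      have hrec := ih idx idx hpw' hidx le_rfl
        (fun z hz => hmem z (by simp [hz]))
        (by intro z hz
            rcases hcover z hz with h | h
            · left; omega
            · rcases List.mem_cons.mp h with h | h
              · left; omega
              · right; exact h)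
      simp only [pvScanA, if_neg h1, hrec, List.filterMap_cons, pvF, hcontains,
        Bool.false_eq_true, if_false, hext1]
      by_cases h2 : prev - rs ≥ 1
      · rw [if_pos h2, if_pos (by omega : prev + 1 - rs ≥ 2)]
        by_cases h3 : pvExtendRun bonded bonded.length (idx + 1) - idx ≥ 2 <;>
          simp [h3, List.append_assoc]
      · rw [if_neg h2, if_neg (by omega : ¬ prev + 1 - rs ≥ 2)]
        by_cases h3 : pvExtendRun bonded bonded.length (idx + 1) - idx ≥ 2 <;>
          simp [h3]

lemma pvF_some_fst (bonded : List Int) (x : Int) (p : Int × Int)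
    (h : pvF bonded x = some p) : p.1 = x := by
  simp only [pvF] at h
  split_ifs at h with h1 h2
  · cases h; rfl

-- both ports compute filterMap (pvF bonded) over the strictly sorted distinct list
lemma pvA_eq_filterMap (bonded : List Int) (genotype_len : Int) (h : Int) (t : List Int)
    (hs : PySem.List.sorted bonded (fun x => x) false = h :: t)
    (hb : bonded ≠ []) (hnd : bonded.Nodup) :
    find_bonded_runs_py bonded genotype_len = (h :: t).filterMap (pvF bonded) := by
  have hperm : (h :: t).Perm bonded := hs ▸ PySem.List.sorted_perm bonded (fun x => x) false
  have hpw_le : List.Pairwise (fun a b : Int => a ≤ b) (h :: t) :=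
    hs ▸ PySem.List.sorted_pairwise bonded (fun x => x)
  have hnd' : (h :: t).Nodup := hperm.nodup_iff.mpr hnd
  have hpwlt : List.Pairwise (· < ·) (h :: t) :=
    (hpw_le.and hnd').imp (fun hab => lt_of_le_of_ne hab.1 hab.2)
  have hmemiff : ∀ z : Int, z ∈ (h :: t) ↔ z ∈ bonded := fun z => hperm.mem_iff
  have hscan := pvScanA_eq_filterMap bonded t h h hpwlt
    ((hmemiff h).mp (by simp)) le_rfl
    (fun z hz => (hmemiff z).mp (by simp [hz]))
    (by intro z hz
        rcases List.mem_cons.mp ((hmemiff z).mpr hz) with h' | h'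
        · left; omega
        · right; exact h')
  have hnh1 : (h - 1) ∉ bonded := by
    intro hmem
    rcases List.mem_cons.mp ((hmemiff _).mpr hmem) with h' | h'
    · omega
    · have := (List.pairwise_cons.mp hpwlt).1 _ h'; omega
  have hcontains : PySem.Set.contains bonded (h - 1) = false := by
    simp only [PySem.Set.contains, List.contains_iff_mem]
    simpa using hnh1
  unfold find_bonded_runs_py
  rw [if_neg hb, hs]
  have hA := pvFoldlA_eq_scanA t [] h h
  rw [List.nil_append, hscan] at hA
  refine hA.trans ?_
  by_cases hq : pvExtendRun bonded bonded.length (h + 1) - h ≥ 2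
  · have hfh : pvF bonded h = some (h, pvExtendRun bonded bonded.length (h + 1)) := by
      simp only [pvF]
      rw [if_neg (by simp [hcontains, hnh1]), if_pos hq]
    rw [List.filterMap_cons_some hfh, if_pos hq]
    rfl
  · have hfh : pvF bonded h = none := by
      simp only [pvF]
      rw [if_neg (by simp [hcontains, hnh1]), if_neg hq]
    rw [List.filterMap_cons_none hfh, if_neg hq]
    rfl

lemma pvB_eq_filterMap (bonded : List Int) (genotype_len : Int) (h : Int) (t : List Int)
    (hs : PySem.List.sorted bonded (fun x => x) false = h :: t)
    (hnd : bonded.Nodup) :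
    find_bonded_runs_py_alt bonded genotype_len = (h :: t).filterMap (pvF bonded) := by
  have hperm : (h :: t).Perm bonded := hs ▸ PySem.List.sorted_perm bonded (fun x => x) false
  have hpw_le : List.Pairwise (fun a b : Int => a ≤ b) (h :: t) :=
    hs ▸ PySem.List.sorted_pairwise bonded (fun x => x)
  have hnd' : (h :: t).Nodup := hperm.nodup_iff.mpr hnd
  have hpwlt : List.Pairwise (· < ·) (h :: t) :=
    (hpw_le.and hnd').imp (fun hab => lt_of_le_of_ne hab.1 hab.2)
  unfold find_bonded_runs_py_alt
  rw [pvFoldlB_eq_filterMap bonded bonded [], List.nil_append]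
  exact PySem.List.sorted_eq_of_perm_of_pairwise_lt _ _ _
    (hperm.filterMap (pvF bonded))
    (List.pairwise_filterMap.mpr (hpwlt.imp (by
      intro a b hab p hp q hq
      rw [pvF_some_fst bonded a p hp, pvF_some_fst bonded b q hq]
      exact hab)))

-- ===== VERDICT (by name: the statement is the Claim_ definition above) =====
theorem find_bonded_runs_py_spec : Claim_equal_find_bonded_runs_py := by
  intro bonded genotype_len _ hnd
  unfold Spec_find_bonded_runs_py
  by_cases hb : bonded = []
  · subst hb; rfl
  · rcases hcase : PySem.List.sorted bonded (fun x => x) false with _ | ⟨h, t⟩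
    · exact absurd ((PySem.List.sorted_eq_nil_iff bonded (fun x => x) false).mp hcase) hb
    · rw [pvA_eq_filterMap bonded genotype_len h t hcase hb hnd,
        pvB_eq_filterMap bonded genotype_len h t hcase hnd]
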